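-- pv_equiv track=rewrite | github.com/DanCalancea/test-Advent-cont-2021 | 2022/problema25a22.py | base5
-- ===== SOURCE A (Python) =====
-- def base5(n):
--     s = ""
--     while n:
--         s = str(n % 5) + s
--         n //= 5
--     ante = 0
--     s2 = ''
--     peste5 = False
--     for x in range(len(s) - 1, -1, -1):
--         newdigit = int(s[x]) + ante
--         if newdigit >= 5:
--             newdigit = newdigit - 5
--             peste5 = True
--
--         if newdigit <= 2:
--             s2 = str(newdigit) + s2
--             if peste5:
--                 peste5 = False
--                 ante = 1
--             else:
--                 ante = 0
--
--             continue
--         elif newdigit == 3: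
--             s2 = '=' + s2
--             ante = 1
--         elif newdigit == 4:
--
--             s2 = '-' + s2
--             ante = 1
--
--     if ante == 1:
--         s2 = '1' + s2
--     return s2  #
-- ===== SOURCE B (Python) =====
-- def base5(n):
--     out = ""
--     while n > 0:
--         r = n % 5
--         if r <= 2:
--             out = str(r) + out
--             n //= 5
--         else:
--             out = ("=" if r == 3 else "-") + out
--             n = n // 5 + 1
--     return out
-- ===== Notes on version B (the rewrite author's own statement) =====
-- stated objective: simpler
-- what changed: B replaces A's two passes (build a base-5 digit string, then rewrite it right-to-left with ante/peste5 carry flags and a final carry-out prepend) by a single division loop on n that emits balanced digits directly, folding the carry into n = n//5 + 1.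
import Mathlib
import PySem

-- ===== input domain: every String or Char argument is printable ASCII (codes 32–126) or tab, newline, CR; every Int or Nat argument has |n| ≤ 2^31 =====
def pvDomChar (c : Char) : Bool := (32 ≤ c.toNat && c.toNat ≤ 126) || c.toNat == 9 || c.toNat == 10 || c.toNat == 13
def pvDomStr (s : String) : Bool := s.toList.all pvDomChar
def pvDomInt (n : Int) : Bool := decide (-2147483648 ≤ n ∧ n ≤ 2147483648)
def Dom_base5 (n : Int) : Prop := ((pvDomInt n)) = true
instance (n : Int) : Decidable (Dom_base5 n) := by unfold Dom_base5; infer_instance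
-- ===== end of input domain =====

-- B replaces A's two passes (base-5 string, then a right-to-left carry rewrite) by one
-- division loop emitting balanced digits directly; objective: simpler.

-- ===== PORT A =====

-- int(s[x]) for the digit characters '0'..'4' that the first loop produces (exact there)
def pvDigit (c : Char) : Int := (c.toNat : Int) - 48

-- first loop: 'while n: s = str(n % 5) + s; n //= 5'
-- (guard 0 < n only makes it total: Python diverges for n < 0, which Pre_base5 excludes)
def pvRepLoop (n : Int) (s : String) : String :=
  if _h : 0 < n then
    pvRepLoop (PySem.Int.floordiv n 5) (PySem.Int.toStr (PySem.Int.mod n 5) ++ s)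
  else s
termination_by n.toNat
decreasing_by
  rw [PySem.Int.floordiv_eq_ediv_of_pos (by norm_num : (0:Int) < 5)]
  omega

-- second loop: 'for x in range(len(s)-1, -1, -1)' visiting s[x] right to left,
-- ported as structural recursion over the reversed character list; state = (ante, s2, peste5),
-- result = (s2, ante)
def pvAnteLoop : List Char → Int → String → Bool → String × Int
  | [], ante, s2, _ => (s2, ante)
  | c :: rest, ante, s2, peste5 =>
      let nd0 := pvDigit c + ante
      let nd := if nd0 ≥ 5 then nd0 - 5 else nd0
      let p := if nd0 ≥ 5 then true else peste5
      if nd ≤ 2 then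
        if p then pvAnteLoop rest 1 (PySem.Int.toStr nd ++ s2) false
        else pvAnteLoop rest 0 (PySem.Int.toStr nd ++ s2) p
      else if nd = 3 then pvAnteLoop rest 1 ("=" ++ s2) p
      else if nd = 4 then pvAnteLoop rest 1 ("-" ++ s2) p
      else pvAnteLoop rest ante s2 p

def base5 (n : Int) : String :=
  let s := pvRepLoop n ""
  let r := pvAnteLoop s.toList.reverse 0 "" false
  if r.2 = 1 then "1" ++ r.1 else r.1

-- ===== PORT B =====

-- single loop: 'while n > 0: r = n % 5; ...'
def pvSnafuLoop (n : Int) (acc : String) : String :=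
  if _h : 0 < n then
    let r := PySem.Int.mod n 5
    if r ≤ 2 then pvSnafuLoop (PySem.Int.floordiv n 5) (PySem.Int.toStr r ++ acc)
    else if r = 3 then pvSnafuLoop (PySem.Int.floordiv n 5 + 1) ("=" ++ acc)
    else pvSnafuLoop (PySem.Int.floordiv n 5 + 1) ("-" ++ acc)
  else acc
termination_by n.toNat
decreasing_by
  all_goals rw [PySem.Int.floordiv_eq_ediv_of_pos (by norm_num : (0:Int) < 5)]
  · omega
  all_goals
    have h3 : ¬ PySem.Int.mod n 5 ≤ 2 := by assumption
    rw [PySem.Int.mod_eq_emod_of_pos (by norm_num : (0:Int) < 5)] at h3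
    omega

def base5_alt (n : Int) : String := pvSnafuLoop n ""

-- ===== PRECONDITION & SPEC =====
-- Pre_ excludes n < 0, on which Python A loops forever (n //= 5 never reaches 0); A returns on all n ≥ 0.
def Pre_base5 (n : Int) : Prop := 0 ≤ n
instance (n : Int) : Decidable (Pre_base5 n) := by unfold Pre_base5; infer_instance
def pvWitness_base5 : Int := (2022)

def Spec_base5 (n : Int) (out : String) : Prop := out = base5_alt n
instance (n : Int) (out : String) : Decidable (Spec_base5 n out) := by unfold Spec_base5; infer_instance

-- ===== CLAIM (what is proved, stated in full; the proofs are below) =====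
def Claim_equal_base5 : Prop := ∀ (n : Int), Dom_base5 n → Pre_base5 n → Spec_base5 n (base5 n)

-- ===== LEMMAS AND PROOFS =====

theorem pvRepLoop_pos {n : Int} (h : 0 < n) (s : String) :
    pvRepLoop n s = pvRepLoop (PySem.Int.floordiv n 5) (PySem.Int.toStr (PySem.Int.mod n 5) ++ s) := by
  rw [pvRepLoop]; simp [h]

theorem pvRepLoop_nonpos {n : Int} (h : ¬ 0 < n) (s : String) : pvRepLoop n s = s := by
  rw [pvRepLoop]; simp [h]

theorem pvRepLoop_append : ∀ (k : Nat) (n : Int), n.toNat ≤ k → ∀ s : String,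
    pvRepLoop n s = pvRepLoop n "" ++ s := by
  intro k
  induction k with
  | zero =>
    intro n hk s
    by_cases h : 0 < n
    · omega
    · rw [pvRepLoop_nonpos h, pvRepLoop_nonpos h]; simp
  | succ k ih =>
    intro n hk s
    by_cases h : 0 < n
    · have hq : (PySem.Int.floordiv n 5).toNat ≤ k := by
        rw [PySem.Int.floordiv_eq_ediv_of_pos (by norm_num : (0:Int) < 5)]; omega
      rw [pvRepLoop_pos h, pvRepLoop_pos h, ih _ hq, ih _ hq (PySem.Int.toStr _ ++ "")]
      simp [String.append_assoc]
    · rw [pvRepLoop_nonpos h, pvRepLoop_nonpos h]; simp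

theorem toChars_small {r : Int} (h0 : 0 ≤ r) (h5 : r < 5) :
    PySem.Int.toChars r = [Char.ofNat (48 + r.toNat)] := by
  interval_cases r <;> decide

theorem pvDigit_small {r : Int} (h0 : 0 ≤ r) (h5 : r < 5) :
    pvDigit (Char.ofNat (48 + r.toNat)) = r := by
  interval_cases r <;> decide

theorem pvSnafu_main : ∀ (k : Nat) (n a : Int), n.toNat ≤ k → 0 ≤ n → (a = 0 ∨ a = 1) →
    ∀ s2 : String,
    (if (pvAnteLoop ((pvRepLoop n "").toList.reverse) a s2 false).2 = 1
     then "1" ++ (pvAnteLoop ((pvRepLoop n "").toList.reverse) a s2 false).1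
     else (pvAnteLoop ((pvRepLoop n "").toList.reverse) a s2 false).1) = pvSnafuLoop (n + a) s2 := by
  have h5 : (0:Int) < 5 := by norm_num
  have hbase : ∀ (a : Int), (a = 0 ∨ a = 1) → ∀ s2 : String,
      (if (pvAnteLoop ((pvRepLoop 0 "").toList.reverse) a s2 false).2 = 1
       then "1" ++ (pvAnteLoop ((pvRepLoop 0 "").toList.reverse) a s2 false).1
       else (pvAnteLoop ((pvRepLoop 0 "").toList.reverse) a s2 false).1) = pvSnafuLoop (0 + a) s2 := by
    intro a ha s2
    rw [pvRepLoop_nonpos (by omega)]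
    rcases ha with ha | ha <;> subst ha <;> simp [pvAnteLoop]
    · rw [pvSnafuLoop]; simp
    · rw [pvSnafuLoop]
      have hm : PySem.Int.mod 1 5 = 1 := by decide
      have hf : PySem.Int.floordiv 1 5 = 0 := by decide
      rw [hm, hf] at *
      norm_num
      rw [pvSnafuLoop]
      simp
      decide
  intro k
  induction k with
  | zero =>
    intro n a hk hn ha s2
    have hn0 : n = 0 := by omega
    subst hn0
    exact hbase a ha s2
  | succ k ih =>
    intro n a hk hn ha s2
    by_cases h : 0 < n
    · -- peel one digit of n
      have hd : PySem.Int.mod n 5 = n % 5 := PySem.Int.mod_eq_emod_of_pos h5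
      have hq : PySem.Int.floordiv n 5 = n / 5 := PySem.Int.floordiv_eq_ediv_of_pos h5
      have hd0 : 0 ≤ n % 5 := by omega
      have hd5 : n % 5 < 5 := by omega
      have hq0 : 0 ≤ n / 5 := by omega
      have hqk : (n / 5).toNat ≤ k := by omega
      have hrev : (pvRepLoop n "").toList.reverse
          = Char.ofNat (48 + (n % 5).toNat) :: (pvRepLoop (n / 5) "").toList.reverse := by
        rw [pvRepLoop_pos h, hd, hq, pvRepLoop_append k _ (by omega)]
        simp [PySem.Int.toList_toStr, toChars_small hd0 hd5]
      rw [hrev]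
      simp only [pvAnteLoop, pvDigit_small hd0 hd5]
      have hna : n + a = (n / 5) * 5 + (n % 5 + a) := by omega
      have hpos : 0 < n + a := by omega
      by_cases hle : n % 5 + a ≤ 2
      · have hge : ¬ n % 5 + a ≥ 5 := by omega
        simp only [if_neg hge, if_pos hle, Bool.false_eq_true, if_false]
        rw [ih _ 0 hqk hq0 (Or.inl rfl) (PySem.Int.toStr (n % 5 + a) ++ s2)]
        conv_rhs => rw [pvSnafuLoop]
        have hm : (n + a) % 5 = n % 5 + a := by omega
        have hf : (n + a) / 5 = n / 5 := by omega
        simp [hpos, hm, hf, hle]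
      · by_cases h3 : n % 5 + a = 3
        · have hge : ¬ n % 5 + a ≥ 5 := by omega
          simp only [if_neg hge, if_neg hle, if_pos h3]
          rw [ih _ 1 hqk hq0 (Or.inr rfl) ("=" ++ s2)]
          conv_rhs => rw [pvSnafuLoop]
          have hm : (n + a) % 5 = 3 := by omega
          have hf : (n + a) / 5 = n / 5 := by omega
          simp [hpos, hm, hf]
        · by_cases h4 : n % 5 + a = 4
          · have hge : ¬ n % 5 + a ≥ 5 := by omega
            simp only [if_neg hge, if_neg hle, if_neg h3, if_pos h4]
            rw [ih _ 1 hqk hq0 (Or.inr rfl) ("-" ++ s2)]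
            conv_rhs => rw [pvSnafuLoop]
            have hm : (n + a) % 5 = 4 := by omega
            have hf : (n + a) / 5 = n / 5 := by omega
            simp [hpos, hm, hf]
          · -- n % 5 + a = 5: newdigit wraps to 0, peste5 is set, '0' emitted, ante becomes 1
            have h5a : n % 5 + a = 5 := by omega
            have hge : n % 5 + a ≥ 5 := by omega
            simp only [h5a]
            norm_num
            rw [ih _ 1 hqk hq0 (Or.inr rfl) (PySem.Int.toStr 0 ++ s2)]
            conv_rhs => rw [pvSnafuLoop]
            have hm : (n + a) % 5 = 0 := by omega
            have hf : (n + a) / 5 = n / 5 + 1 := by omega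
            simp [hpos, hm, hf]
    · have hn0 : n = 0 := by omega
      subst hn0
      exact hbase a ha s2

-- ===== VERDICT (by name: the statement is the Claim_ definition above) =====
theorem base5_spec : Claim_equal_base5 := by
  intro n _hd hp
  unfold Spec_base5 base5 base5_alt
  have := pvSnafu_main n.toNat n 0 le_rfl hp (Or.inl rfl) ""
  simpa using this
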